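-- pv_equiv track=rewrite | github.com/Torfab/adventOfCodeAndOtherEvents | adventOfCode/2020/day6.py | buildDeclarationsForm
-- ===== SOURCE A (Python) =====
-- def buildDeclarationsForm(rows):
--   declarationForms=[]
--
--   singleGroup=[]
--   for row in rows:
--     if(row==""):
--       declarationForms.append(singleGroup)
--       singleGroup=[]
--       continue
--     singleGroup.append(row)
--   declarationForms.append(singleGroup)
--   return declarationForms
-- ===== SOURCE B (Python) =====
-- def buildDeclarationsForm(rows):
--   if "" in rows:
--     i = rows.index("")
--     return [rows[:i]] + buildDeclarationsForm(rows[i+1:])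
--   return [rows]
-- ===== Notes on version B (the rewrite author's own statement) =====
-- stated objective: alternative
-- what changed: Replaced A's single-pass accumulator/reset loop with a recursive decomposition that splits at the first blank line and recurses on the remainder.
import Mathlib
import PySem

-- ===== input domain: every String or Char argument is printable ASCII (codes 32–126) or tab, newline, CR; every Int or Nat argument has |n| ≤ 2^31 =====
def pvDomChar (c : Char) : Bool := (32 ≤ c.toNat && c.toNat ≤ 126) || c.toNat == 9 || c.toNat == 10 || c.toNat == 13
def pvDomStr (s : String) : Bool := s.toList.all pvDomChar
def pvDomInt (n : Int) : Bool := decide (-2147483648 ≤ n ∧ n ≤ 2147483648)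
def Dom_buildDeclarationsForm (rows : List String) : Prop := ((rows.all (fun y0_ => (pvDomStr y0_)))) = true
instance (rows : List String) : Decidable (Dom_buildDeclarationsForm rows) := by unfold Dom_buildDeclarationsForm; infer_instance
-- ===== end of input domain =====

-- B replaces A's accumulator/reset loop by recursion splitting at the first blank line; alternative decomposition, same cost.


-- ===== PORT A =====
def buildDeclarationsForm (rows : List String) : List (List String) :=
  let st := rows.foldl
    (fun (s : List (List String) × List String) row =>
      if row == "" then (s.1 ++ [s.2], ([] : List String))
      else (s.1, s.2 ++ [row]))
    (([] : List (List String)), ([] : List String))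
  st.1 ++ [st.2]

-- ===== PORT B =====
def buildDeclarationsForm_alt (rows : List String) : List (List String) :=
  if h : "" ∈ rows then
    (rows.take (rows.idxOf "")) ::
      buildDeclarationsForm_alt (rows.drop (rows.idxOf "" + 1))
  else [rows]
termination_by rows.length
decreasing_by
  have hne : rows ≠ [] := by intro hnil; simp [hnil] at h
  have : 0 < rows.length := List.length_pos_iff.mpr hne
  simp [List.length_drop]; omega

-- ===== PRECONDITION & SPEC =====
def Spec_buildDeclarationsForm (rows : List String) (out : List (List String)) : Prop := out = buildDeclarationsForm_alt rows
instance (rows : List String) (out : List (List String)) : Decidable (Spec_buildDeclarationsForm rows out) := by unfold Spec_buildDeclarationsForm; infer_instance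

-- ===== CLAIM (what is proved, stated in full; the proofs are below) =====
def Claim_equal_buildDeclarationsForm : Prop := ∀ (rows : List String), Dom_buildDeclarationsForm rows → Spec_buildDeclarationsForm rows (buildDeclarationsForm rows)

-- ===== LEMMAS AND PROOFS =====

-- prepend cur onto the head group of a (non-empty) group list
def pvPH (cur : List String) : List (List String) → List (List String)
  | [] => [cur]
  | h :: t => (cur ++ h) :: t

theorem alt_nil : buildDeclarationsForm_alt [] = [[]] := by
  unfold buildDeclarationsForm_alt; simp

theorem alt_cons_blank (rs : List String) :
    buildDeclarationsForm_alt ("" :: rs) = [] :: buildDeclarationsForm_alt rs := by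
  rw [buildDeclarationsForm_alt]
  simp

theorem alt_cons_ne (r : String) (rs : List String) (hr : r ≠ "") :
    buildDeclarationsForm_alt (r :: rs) = pvPH [r] (buildDeclarationsForm_alt rs) := by
  by_cases hm : "" ∈ rs
  · rw [buildDeclarationsForm_alt]
    have hmem : "" ∈ r :: rs := List.mem_cons_of_mem _ hm
    have hb : (r == "") = false := beq_eq_false_iff_ne.mpr hr
    have hidx : (r :: rs).idxOf "" = rs.idxOf "" + 1 := by
      simp [List.idxOf_cons, hb]

    rw [dif_pos hmem, hidx]
    conv_rhs => rw [buildDeclarationsForm_alt, dif_pos hm]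
    simp [pvPH, List.take_succ_cons, List.drop_succ_cons]
  · have hmem : "" ∉ r :: rs := by
      intro h; rcases List.mem_cons.mp h with h | h
      · exact hr h.symm
      · exact hm h
    rw [buildDeclarationsForm_alt, dif_neg hmem]
    conv_rhs => rw [buildDeclarationsForm_alt, dif_neg hm]
    simp [pvPH]

theorem alt_ne_nil (rows : List String) : buildDeclarationsForm_alt rows ≠ [] := by
  rw [buildDeclarationsForm_alt]; split <;> simp

theorem pvPH_pvPH (a b : List String) (l : List (List String)) :
    pvPH a (pvPH b l) = pvPH (a ++ b) l := by
  cases l <;> simp [pvPH]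

theorem loop_eq (rows : List String) : ∀ (forms : List (List String)) (cur : List String),
    (rows.foldl
      (fun (s : List (List String) × List String) row =>
        if row == "" then (s.1 ++ [s.2], ([] : List String))
        else (s.1, s.2 ++ [row]))
      (forms, cur)).1 ++
    [(rows.foldl
      (fun (s : List (List String) × List String) row =>
        if row == "" then (s.1 ++ [s.2], ([] : List String))
        else (s.1, s.2 ++ [row]))
      (forms, cur)).2] = forms ++ pvPH cur (buildDeclarationsForm_alt rows) := by
  induction rows with
  | nil => intro forms cur; simp [alt_nil, pvPH]
  | cons r rs ih =>
    intro forms cur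
    by_cases hr : r = ""
    · subst hr
      simp only [List.foldl_cons, beq_self_eq_true, if_true]
      rw [ih (forms ++ [cur]) []]
      rw [alt_cons_blank]
      cases hcase : buildDeclarationsForm_alt rs with
      | nil => exact absurd hcase (alt_ne_nil rs)
      | cons h t => simp [pvPH]
    · have hb : (r == "") = false := beq_eq_false_iff_ne.mpr hr
      simp only [List.foldl_cons, hb, Bool.false_eq_true, if_false]
      rw [ih forms (cur ++ [r])]
      rw [alt_cons_ne r rs hr, pvPH_pvPH]

-- ===== VERDICT (by name: the statement is the Claim_ definition above) =====
theorem buildDeclarationsForm_spec : Claim_equal_buildDeclarationsForm := by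
  intro rows _
  unfold Spec_buildDeclarationsForm buildDeclarationsForm
  have h := loop_eq rows [] []
  simp only [List.nil_append] at h
  rw [h]
  cases hcase : buildDeclarationsForm_alt rows with
  | nil => exact absurd hcase (alt_ne_nil rows)
  | cons h t => simp [pvPH]
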